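-- pv_equiv track=rewrite | github.com/thedarkking01/Python-Projects | interview question/Advance/Extend the Vowels.py | vowel_repeater
-- ===== SOURCE A (Python) =====
-- def vowel_repeater(string, n):
--
--     # initialize a variable with all vowels
--     vowels = 'aeiou'
--
--     # initialize an empty string
--     new_string = ''
--
--     # loop through each character in a string
--     for character in string:
--
--         # if the character is in vowels list
--         if character.lower() in vowels:
--
--             # add the character n times to the new_string
--             new_string += character * n
--
--         # if the character is not in vowels list
--         else:
--
--             # add the character as it is to the new_string
--             new_string += character
--
--     # return the new_string
--     return new_string
-- ===== SOURCE B (Python) =====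
-- def vowel_repeater(string, n):
--     # Staged rewrite: one split/join pass per vowel replaces each occurrence
--     # of that vowel with it repeated n times; vowels are pairwise distinct
--     # and a replacement introduces only the already-processed vowel itself,
--     # so the stages commute with the single-pass expansion. Vowels absent
--     # from the string are skipped.
--     for v in 'aeiouAEIOU':
--         if v in string:
--             string = (v * n).join(string.split(v))
--     return string
-- ===== Notes on version B (the rewrite author's own statement) =====
-- stated objective: alternative
-- what changed: Replaces A's single character-by-character loop (accumulating with += and a lowercased vowel test) by ten staged whole-string passes, one per vowel case: string = (v*n).join(string.split(v)), correct because the vowels are distinct and each stage only reinserts its own already-processed vowel.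
import Mathlib
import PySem

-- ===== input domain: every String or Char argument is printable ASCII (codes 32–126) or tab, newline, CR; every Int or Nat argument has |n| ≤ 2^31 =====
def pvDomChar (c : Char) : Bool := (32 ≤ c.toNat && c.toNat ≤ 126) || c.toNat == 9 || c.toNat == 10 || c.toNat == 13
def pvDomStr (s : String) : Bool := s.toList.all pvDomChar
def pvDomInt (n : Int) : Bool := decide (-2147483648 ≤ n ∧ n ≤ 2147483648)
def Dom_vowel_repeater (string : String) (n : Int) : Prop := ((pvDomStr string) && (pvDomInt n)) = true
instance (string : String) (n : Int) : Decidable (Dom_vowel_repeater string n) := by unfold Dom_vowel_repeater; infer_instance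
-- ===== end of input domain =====

-- B replaces A's single accumulate-with-+= character loop by ten staged passes,
-- one split/join pass per vowel (string = (v*n).join(string.split(v))): an
-- alternative decomposition of the same O(m*n) task.


-- ===== PORT A =====
-- loop: new_string += character * n if character.lower() in 'aeiou' else character
def vowel_repeater (string : String) (n : Int) : String :=
  let vowels : List Char := "aeiou".toList
  let new_string : List Char :=
    string.toList.foldl
      (fun acc character =>
        if PySem.Chars.isIn [PySem.Chars.lowerChar character] vowels then
          acc ++ PySem.List.pyRepeat [character] n
        else
          acc ++ [character])
      []
  String.mk new_string

-- ===== PORT B =====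
-- for v in 'aeiouAEIOU': if v in string: string = (v * n).join(string.split(v))
def vowel_repeater_alt (string : String) (n : Int) : String :=
  String.mk
    (("aeiouAEIOU".toList).foldl
      (fun s v =>
        if PySem.Chars.isIn [v] s then
          PySem.Chars.join (PySem.List.pyRepeat [v] n) (PySem.Chars.splitOn s [v])
        else s)
      string.toList)

-- ===== PRECONDITION & SPEC =====
def Spec_vowel_repeater (string : String) (n : Int) (out : String) : Prop := out = vowel_repeater_alt string n
instance (string : String) (n : Int) (out : String) : Decidable (Spec_vowel_repeater string n out) := by unfold Spec_vowel_repeater; infer_instance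

-- ===== CLAIM (what is proved, stated in full; the proofs are below) =====
def Claim_equal_vowel_repeater : Prop := ∀ (string : String) (n : Int), Dom_vowel_repeater string n → Spec_vowel_repeater string n (vowel_repeater string n)

-- ===== LEMMAS AND PROOFS =====

-- per-character replacement step shared by both characterizations
def vrRepl (n : Int) (v c : Char) : List Char :=
  if c = v then PySem.List.pyRepeat [v] n else [c]

-- functional split on a single character (used only to characterize splitOn)
def vrSp (v : Char) : List Char → List (List Char)
  | [] => [[]]
  | c :: rest => if c = v then [] :: vrSp v rest else (vrSp v rest).modifyHead (c :: ·)

lemma vrSp_ne_nil (v : Char) (l : List Char) : vrSp v l ≠ [] := by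
  induction l with
  | nil => simp [vrSp]
  | cons c rest ih =>
    simp only [vrSp]
    split_ifs
    · simp
    · cases h : vrSp v rest with
      | nil => exact absurd h ih
      | cons p ps => simp [List.modifyHead]

lemma go_eq (v : Char) (fuel : Nat) (l cur : List Char) (acc : List (List Char)) (h : l.length < fuel) :
    PySem.Chars.splitOn.go [v] fuel l cur acc
      = acc.reverse ++ (vrSp v l).modifyHead (cur.reverse ++ ·) := by
  induction fuel generalizing l cur acc with
  | zero => omega
  | succ f ih =>
    cases l with
    | nil => simp [PySem.Chars.splitOn.go, vrSp, List.modifyHead]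
    | cons c rest =>
      simp only [PySem.Chars.splitOn.go, List.isPrefixOf, Bool.and_true]
      by_cases hcv : c = v
      · subst hcv
        simp only [beq_self_eq_true, if_true]
        have hd : List.drop [c].length (c :: rest) = rest := by simp
        rw [hd, ih rest [] (cur.reverse :: acc) (by simpa using Nat.lt_of_succ_lt_succ (by simpa using h))]
        simp only [vrSp, List.reverse_nil, List.reverse_cons,
          List.append_assoc, List.cons_append, List.nil_append]
        cases vrSp c rest <;> simp [List.modifyHead]
      · have hvc : (v == c) = false := beq_eq_false_iff_ne.mpr (Ne.symm hcv)
        simp only [hvc]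
        rw [ih rest (c :: cur) acc (by simpa using Nat.lt_of_succ_lt_succ (by simpa using h))]
        simp only [vrSp, if_neg hcv, List.reverse_cons]
        cases hsp : vrSp v rest with
        | nil => exact absurd hsp (vrSp_ne_nil v rest)
        | cons p ps => simp [List.modifyHead]

lemma splitOn_eq_vrSp (v : Char) (l : List Char) :
    PySem.Chars.splitOn l [v] = vrSp v l := by
  unfold PySem.Chars.splitOn
  rw [go_eq v (l.length + 1) l [] [] (by omega)]
  cases hsp : vrSp v l with
  | nil => exact absurd hsp (vrSp_ne_nil v l)
  | cons p ps => simp [List.modifyHead]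

lemma join_cons_head (rep : List Char) (c : Char) (p : List Char) (ps : List (List Char)) :
    PySem.Chars.join rep ((c :: p) :: ps) = c :: PySem.Chars.join rep (p :: ps) := by
  cases ps with
  | nil => simp [PySem.Chars.join_singleton]
  | cons q qs => simp [PySem.Chars.join_cons_cons]

lemma join_vrSp (rep : List Char) (v : Char) (l : List Char) :
    PySem.Chars.join rep (vrSp v l) = l.flatMap (fun c => if c = v then rep else [c]) := by
  induction l with
  | nil => simp [vrSp, PySem.Chars.join_singleton]
  | cons c rest ih =>
    simp only [vrSp, List.flatMap_cons]
    by_cases hcv : c = v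
    · subst hcv
      cases hsp : vrSp c rest with
      | nil => exact absurd hsp (vrSp_ne_nil c rest)
      | cons p ps =>
        rw [hsp] at ih
        simp [PySem.Chars.join_cons_cons, ih]
    · simp only [if_neg hcv]
      cases hsp : vrSp v rest with
      | nil => exact absurd hsp (vrSp_ne_nil v rest)
      | cons p ps =>
        rw [hsp] at ih
        simp [List.modifyHead, join_cons_head, ih]

-- one split/join stage is the per-character replacement for that vowel
lemma stage_eq (n : Int) (v : Char) (l : List Char) :
    PySem.Chars.join (PySem.List.pyRepeat [v] n) (PySem.Chars.splitOn l [v])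
      = l.flatMap (vrRepl n v) := by
  rw [splitOn_eq_vrSp, join_vrSp]; rfl

-- replacing an absent character is the identity
lemma flatMap_repl_notmem (n : Int) (v : Char) (l : List Char) (h : v ∉ l) :
    l.flatMap (vrRepl n v) = l := by
  induction l with
  | nil => rfl
  | cons c rest ih =>
    simp only [List.mem_cons, not_or] at h
    simp [vrRepl, Ne.symm h.1, ih h.2]

lemma foldl_stage_eq (n : Int) (vs : List Char) (l : List Char) :
    vs.foldl
      (fun s v =>
        if PySem.Chars.isIn [v] s then
          PySem.Chars.join (PySem.List.pyRepeat [v] n) (PySem.Chars.splitOn s [v])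
        else s) l
      = vs.foldl (fun s v => s.flatMap (vrRepl n v)) l := by
  induction vs generalizing l with
  | nil => rfl
  | cons v vs ih =>
    simp only [List.foldl_cons]
    by_cases hv : PySem.Chars.isIn [v] l = true
    · rw [if_pos hv, stage_eq, ih]
    · rw [if_neg hv, ih]
      have hnm : v ∉ l := fun hm =>
        hv ((PySem.Chars.isIn_iff_infix [v] l).mpr ((List.singleton_infix_iff v l).mpr hm))
      rw [flatMap_repl_notmem n v l hnm]

lemma fold_flatMap (n : Int) (vs : List Char) (l : List Char) :
    vs.foldl (fun s v => s.flatMap (vrRepl n v)) l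
      = l.flatMap (fun c => vs.foldl (fun s v => s.flatMap (vrRepl n v)) [c]) := by
  induction vs generalizing l with
  | nil => simp
  | cons v vs ih =>
    simp only [List.foldl_cons]
    rw [ih (l.flatMap (vrRepl n v)), List.flatMap_assoc]
    congr 1
    funext c
    rw [ih (List.flatMap (vrRepl n v) [c])]
    simp

lemma repl_flatMap_replicate (n : Int) (v c : Char) (k : Nat) (h : c ≠ v) :
    (List.replicate k c).flatMap (vrRepl n v) = List.replicate k c := by
  induction k with
  | zero => simp
  | succ k ih => simp [List.replicate_succ, vrRepl, h, ih]

lemma fold_replicate (n : Int) (vs : List Char) (c : Char) (k : Nat) (h : ∀ v ∈ vs, c ≠ v) :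
    vs.foldl (fun s v => s.flatMap (vrRepl n v)) (List.replicate k c) = List.replicate k c := by
  induction vs with
  | nil => rfl
  | cons v vs ih =>
    simp only [List.foldl_cons]
    rw [repl_flatMap_replicate n v c k (h v (by simp))]
    exact ih (fun u hu => h u (by simp [hu]))

lemma fold_notmem (n : Int) (vs : List Char) (c : Char) (h : ∀ v ∈ vs, c ≠ v) :
    vs.foldl (fun s v => s.flatMap (vrRepl n v)) [c] = [c] := by
  have := fold_replicate n vs c 1 h
  simpa using this

lemma fold_mem (n : Int) (vs : List Char) (c : Char) (hnd : vs.Nodup) (hm : c ∈ vs) :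
    vs.foldl (fun s v => s.flatMap (vrRepl n v)) [c] = PySem.List.pyRepeat [c] n := by
  induction vs with
  | nil => simp at hm
  | cons v vs ih =>
    rcases List.nodup_cons.mp hnd with ⟨hv, hnd'⟩
    simp only [List.foldl_cons]
    by_cases hcv : c = v
    · subst hcv
      have h1 : List.flatMap (vrRepl n c) [c] = List.replicate n.toNat c := by
        simp [vrRepl, PySem.List.pyRepeat_singleton]
      rw [h1, fold_replicate n vs c n.toNat (fun u hu => by rintro rfl; exact hv hu)]
      simp [PySem.List.pyRepeat_singleton]
    · have h1 : List.flatMap (vrRepl n v) [c] = [c] := by simp [vrRepl, hcv]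
      rw [h1]
      exact ih hnd' (by rcases List.mem_cons.mp hm with h | h; exact absurd h hcv; exact h)

-- on domain characters, A's lowercased vowel test equals membership in the case list
lemma vowel_test (c : Char) (h : pvDomChar c = true) :
    PySem.Chars.isIn [PySem.Chars.lowerChar c] "aeiou".toList
      = "aeiouAEIOU".toList.contains c := by
  have hlt : c.toNat < 127 := by
    simp [pvDomChar] at h
    omega
  have hall : ∀ k ∈ List.range 127,
      PySem.Chars.isIn [PySem.Chars.lowerChar (Char.ofNat k)] "aeiou".toList
        = "aeiouAEIOU".toList.contains (Char.ofNat k) := by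
    set_option maxRecDepth 20000 in decide
  have := hall c.toNat (List.mem_range.mpr hlt)
  simpa using this

-- A's foldl loop as a flatMap over characters
lemma a_side (n : Int) (l : List Char) (acc : List Char) :
    l.foldl
      (fun acc character =>
        if PySem.Chars.isIn [PySem.Chars.lowerChar character] "aeiou".toList then
          acc ++ PySem.List.pyRepeat [character] n
        else
          acc ++ [character])
      acc
    = acc ++ l.flatMap
        (fun c => if PySem.Chars.isIn [PySem.Chars.lowerChar c] "aeiou".toList then
            PySem.List.pyRepeat [c] n else [c]) := by
  induction l generalizing acc with
  | nil => simp
  | cons c l ih =>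
    simp only [List.foldl_cons, List.flatMap_cons]
    rw [ih]
    split_ifs <;> simp

lemma flatMap_congr_mem {α β : Type} (l : List α) (f g : α → List β)
    (h : ∀ a ∈ l, f a = g a) : l.flatMap f = l.flatMap g := by
  induction l with
  | nil => rfl
  | cons a l ih =>
    simp only [List.flatMap_cons, h a (by simp)]
    rw [ih (fun a ha => h a (by simp [ha]))]

-- ===== VERDICT (by name: the statement is the Claim_ definition above) =====
set_option maxHeartbeats 1000000 in
theorem vowel_repeater_spec : Claim_equal_vowel_repeater := by
  intro string n hdom
  have hdom' : pvDomStr string = true := by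
    unfold Dom_vowel_repeater at hdom
    simp at hdom
    exact hdom.1
  unfold Spec_vowel_repeater
  show vowel_repeater string n = vowel_repeater_alt string n
  unfold vowel_repeater vowel_repeater_alt
  dsimp only
  rw [a_side n string.toList [], foldl_stage_eq, fold_flatMap]
  simp only [List.nil_append]
  refine congrArg String.mk (flatMap_congr_mem _ _ _ ?_)
  intro c hc
  have hcdom : pvDomChar c = true := by
    have := (List.all_eq_true.mp (by simpa [pvDomStr] using hdom')) c hc
    simpa using this
  rw [vowel_test c hcdom]
  have hnd : ("aeiouAEIOU".toList).Nodup := by decide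
  by_cases hm : c ∈ "aeiouAEIOU".toList
  · have hct : "aeiouAEIOU".toList.contains c = true := by simpa using hm
    rw [hct, if_pos rfl, fold_mem n _ c hnd hm]
  · have hcf : "aeiouAEIOU".toList.contains c = false := by simpa using hm
    rw [hcf, if_neg (by simp), fold_notmem n _ c (fun v hv => by rintro rfl; exact hm hv)]
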